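-- pv_equiv track=rewrite | github.com/lhy-pkueecs/Test_repository | src/user/prompt.py | check_command_quote_complete
-- ===== SOURCE A (Python) =====
-- def check_command_quote_complete(command: str) -> bool:
--     """
--     Check if the command has a complete quote.
--     """
--     quote = ''
--     for c in command:
--         if c == '"' or c == "'" or c == '`':
--             if quote == '':
--                 quote = c
--             elif quote == c:
--                 quote = ''
--     return quote == ''
-- ===== SOURCE B (Python) =====
-- def check_command_quote_complete(command: str) -> bool:
--     """
--     Check if the command has a complete quote.
--     """
--     i = 0
--     n = len(command)
--     while i < n:
--         c = command[i]
--         if c == '"' or c == "'" or c == '`':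
--             j = command.find(c, i + 1)
--             if j == -1:
--                 return False
--             i = j + 1
--         else:
--             i += 1
--     return True
-- ===== Notes on version B (the rewrite author's own statement) =====
-- stated objective: alternative
-- what changed: Replaced the per-character open/close toggle state machine with a jump-and-scan: on a quote char, str.find locates the identical closing quote and the index jumps past it, so no open-quote state is carried.
import Mathlib
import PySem

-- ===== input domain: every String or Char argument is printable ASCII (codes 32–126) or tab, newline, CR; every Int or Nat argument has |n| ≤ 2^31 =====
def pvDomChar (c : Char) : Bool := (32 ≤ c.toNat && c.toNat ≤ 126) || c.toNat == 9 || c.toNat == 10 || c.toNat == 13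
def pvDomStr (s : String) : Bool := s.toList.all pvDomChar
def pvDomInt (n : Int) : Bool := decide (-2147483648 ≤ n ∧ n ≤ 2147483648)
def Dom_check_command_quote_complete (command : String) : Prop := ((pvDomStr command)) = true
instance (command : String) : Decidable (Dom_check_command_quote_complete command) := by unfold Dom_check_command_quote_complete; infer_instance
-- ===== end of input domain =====

-- B replaces A's open/close toggle state machine with a jump-and-scan that uses
-- find-the-same-quote to skip quoted spans; alternative decomposition, same cost.


-- ===== PORT A =====
-- A's loop: state `quote` is '' or the open quote char; ported as Option Char
-- (none = '', some q = the one-char string q); branches in source order.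
def pvAGo : Option Char → List Char → Bool
  | q, [] => q = none
  | q, c :: rest =>
    if c = '"' ∨ c = '\'' ∨ c = '`' then
      match q with
      | none => pvAGo (some c) rest
      | some q' => if q' = c then pvAGo none rest else pvAGo (some q') rest
    else pvAGo q rest

def check_command_quote_complete (command : String) : Bool :=
  pvAGo none command.toList

-- ===== PORT B =====
-- command.find(c, i+1): scan for the first occurrence of q, returning the suffix after it.
def pvFindSkip (q : Char) : List Char → Option (List Char)
  | [] => none
  | c :: rest => if c = q then some rest else pvFindSkip q rest

theorem pvFindSkip_length {q : Char} : ∀ {l l' : List Char},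
    pvFindSkip q l = some l' → l'.length < l.length := by
  intro l
  induction l with
  | nil => intro l' h; simp [pvFindSkip] at h
  | cons c rest ih =>
    intro l' h
    simp only [pvFindSkip] at h
    split at h
    · cases h; simp
    · exact Nat.lt_trans (ih h) (by simp)

-- B's loop: advance one char, or jump past the matching identical quote; False if none.
def pvBGo : List Char → Bool
  | [] => true
  | c :: rest =>
    if c = '"' ∨ c = '\'' ∨ c = '`' then
      match h : pvFindSkip c rest with
      | none => false
      | some rest' => pvBGo rest'
    else pvBGo rest
termination_by l => l.length
decreasing_by
  · exact Nat.lt_trans (pvFindSkip_length h) (by simp)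
  · simp

def check_command_quote_complete_alt (command : String) : Bool :=
  pvBGo command.toList

-- ===== PRECONDITION & SPEC =====
def Spec_check_command_quote_complete (command : String) (out : Bool) : Prop := out = check_command_quote_complete_alt command
instance (command : String) (out : Bool) : Decidable (Spec_check_command_quote_complete command out) := by unfold Spec_check_command_quote_complete; infer_instance

-- ===== CLAIM (what is proved, stated in full; the proofs are below) =====
def Claim_equal_check_command_quote_complete : Prop := ∀ (command : String), Dom_check_command_quote_complete command → Spec_check_command_quote_complete command (check_command_quote_complete command)

-- ===== LEMMAS AND PROOFS =====

-- With an open quote q (a genuine quote char), A's loop returns false if q never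
-- recurs, and otherwise resumes in the closed state just past the first recurrence.
theorem pvAGo_open (q : Char) (hq : q = '"' ∨ q = '\'' ∨ q = '`') :
    ∀ l : List Char, pvAGo (some q) l =
      (match pvFindSkip q l with
       | none => false
       | some l' => pvAGo none l') := by
  intro l
  induction l with
  | nil => simp [pvAGo, pvFindSkip]
  | cons c rest ih =>
    by_cases hcq : c = q
    · subst hcq
      simp [pvAGo, pvFindSkip, hq]
    · by_cases hc : c = '"' ∨ c = '\'' ∨ c = '`'
      · have hqc : ¬ q = c := fun h => hcq h.symm
        simp only [pvAGo, pvFindSkip, if_pos hc, if_neg hcq]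
        rw [if_neg hqc]
        exact ih
      · have hcq' : ¬ c = q := hcq
        simp only [pvAGo, pvFindSkip, if_neg hc, if_neg hcq]
        exact ih

theorem pvAGo_eq_pvBGo : ∀ l : List Char, pvAGo none l = pvBGo l := by
  intro l
  induction hn : l.length using Nat.strong_induction_on generalizing l with
  | _ n ih =>
    cases l with
    | nil => simp [pvAGo, pvBGo]
    | cons c rest =>
      by_cases hc : c = '"' ∨ c = '\'' ∨ c = '`'
      · rw [pvAGo, pvBGo]
        simp only [if_pos hc]
        rw [pvAGo_open c hc rest]
        cases hf : pvFindSkip c rest with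
        | none => simp
        | some rest' =>
          simp only
          subst hn
          exact ih rest'.length
            (Nat.lt_trans (pvFindSkip_length hf) (by simp)) rest' rfl
      · rw [pvAGo, pvBGo]
        simp only [if_neg hc]
        subst hn
        exact ih rest.length (by simp) rest rfl

-- ===== VERDICT (by name: the statement is the Claim_ definition above) =====
theorem check_command_quote_complete_spec : Claim_equal_check_command_quote_complete := by
  intro command _
  unfold Spec_check_command_quote_complete check_command_quote_complete check_command_quote_complete_alt
  exact pvAGo_eq_pvBGo command.toList
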